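-- pv_equiv track=rewrite | github.com/PrithwishJana/CoTran | transpilers/TSS_CodeConv_PyTranslations/301/GFG.py | MaximumDecimalValue
-- ===== SOURCE A (Python) =====
-- def MaximumDecimalValue(mat, n):
--     dp = [[0 for _ in range(n)] for _ in range(n)]
--     if mat [0][0] == 1:
--         dp [0][0] = 1
--     for i in range(1, n):
--         if mat [0][i] == 1:
--             dp [0][i] = int((dp [0][i - 1] + 2 ** i))
--         else:
--             dp [0][i] = dp [0][i - 1]
--     for i in range(1, n):
--         if mat [i][0] == 1:
--             dp [i][0] = int((dp [i - 1][0] + 2 ** i))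
--         else:
--             dp [i][0] = dp [i - 1][0]
--     for i in range(1, n):
--         for j in range(1, n):
--             if mat [i][j] == 1:
--                 dp [i][j] = int((max(dp [i][j - 1], dp [i - 1][j]) + 2 ** (i + j)))
--             else:
--                 dp [i][j] = max(dp [i][j - 1], dp [i - 1][j])
--     return dp [n - 1][n - 1]
-- ===== SOURCE B (Python) =====
-- def MaximumDecimalValue(mat, n):
--     memo = {}
--
--     def f(i, j):
--         if (i, j) in memo:
--             return memo[(i, j)]
--         if i == 0 and j == 0:
--             v = 0
--         elif i == 0:
--             v = f(0, j - 1)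
--         elif j == 0:
--             v = f(i - 1, 0)
--         else:
--             v = max(f(i - 1, j), f(i, j - 1))
--         if mat[i][j] == 1:
--             v += 2 ** (i + j)
--         memo[(i, j)] = v
--         return v
--
--     return f(n - 1, n - 1)
-- ===== Notes on version B (the rewrite author's own statement) =====
-- stated objective: alternative
-- what changed: Replaces A's bottom-up three-phase table fill (first row, first column, interior, over a preallocated n-by-n list) with demand-driven top-down memoized recursion from the target cell (n-1,n-1), caching results in a dict keyed by (i,j).
import Mathlib
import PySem

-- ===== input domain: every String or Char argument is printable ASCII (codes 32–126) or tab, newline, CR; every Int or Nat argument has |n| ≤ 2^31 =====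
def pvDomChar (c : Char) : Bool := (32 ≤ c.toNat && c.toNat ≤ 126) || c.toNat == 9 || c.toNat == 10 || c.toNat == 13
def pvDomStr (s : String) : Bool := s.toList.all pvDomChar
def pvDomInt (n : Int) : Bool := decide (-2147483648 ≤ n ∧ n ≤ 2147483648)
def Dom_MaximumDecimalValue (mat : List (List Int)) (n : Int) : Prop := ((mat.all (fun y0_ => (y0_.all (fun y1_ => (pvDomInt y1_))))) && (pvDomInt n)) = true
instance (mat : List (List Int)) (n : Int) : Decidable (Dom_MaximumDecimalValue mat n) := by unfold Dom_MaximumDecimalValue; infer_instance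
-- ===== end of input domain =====

-- B replaces A's bottom-up three-phase table fill with top-down memoized recursion
-- from the target cell (alternative decomposition; same asymptotic cost).


-- ===== PORT A =====
-- literal transliteration of A: dp is a list of lists, three loop phases, in-place
-- element writes rendered as pySetD of the modified row (indices are in range under Pre_).
def MaximumDecimalValue (mat : List (List Int)) (n : Int) : Int :=
  let dp : List (List Int) :=
    (PySem.List.pyRange 0 n 1).map (fun _ => (PySem.List.pyRange 0 n 1).map (fun _ => (0 : Int)))
  let dp := if PySem.List.pyGetD (PySem.List.pyGetD mat 0 []) 0 0 = 1 then
      PySem.List.pySetD dp 0 (PySem.List.pySetD (PySem.List.pyGetD dp 0 []) 0 1)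
    else dp
  let dp := (PySem.List.pyRange 1 n 1).foldl (fun dp i =>
      let v := if PySem.List.pyGetD (PySem.List.pyGetD mat 0 []) i 0 = 1 then
          PySem.List.pyGetD (PySem.List.pyGetD dp 0 []) (i - 1) 0 + 2 ^ i.toNat
        else PySem.List.pyGetD (PySem.List.pyGetD dp 0 []) (i - 1) 0
      PySem.List.pySetD dp 0 (PySem.List.pySetD (PySem.List.pyGetD dp 0 []) i v)) dp
  let dp := (PySem.List.pyRange 1 n 1).foldl (fun dp i =>
      let v := if PySem.List.pyGetD (PySem.List.pyGetD mat i []) 0 0 = 1 then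
          PySem.List.pyGetD (PySem.List.pyGetD dp (i - 1) []) 0 0 + 2 ^ i.toNat
        else PySem.List.pyGetD (PySem.List.pyGetD dp (i - 1) []) 0 0
      PySem.List.pySetD dp i (PySem.List.pySetD (PySem.List.pyGetD dp i []) 0 v)) dp
  let dp := (PySem.List.pyRange 1 n 1).foldl (fun dp i =>
      (PySem.List.pyRange 1 n 1).foldl (fun dp j =>
        let v := if PySem.List.pyGetD (PySem.List.pyGetD mat i []) j 0 = 1 then
            max (PySem.List.pyGetD (PySem.List.pyGetD dp i []) (j - 1) 0)
                (PySem.List.pyGetD (PySem.List.pyGetD dp (i - 1) []) j 0) + 2 ^ (i + j).toNat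
          else
            max (PySem.List.pyGetD (PySem.List.pyGetD dp i []) (j - 1) 0)
                (PySem.List.pyGetD (PySem.List.pyGetD dp (i - 1) []) j 0)
        PySem.List.pySetD dp i (PySem.List.pySetD (PySem.List.pyGetD dp i []) j v)) dp) dp
  PySem.List.pyGetD (PySem.List.pyGetD dp (n - 1) []) (n - 1) 0

-- ===== PORT B =====
-- literal transliteration of Source B's helper f: top-down recursion with a dict memo
-- keyed by (i, j), threaded through the calls.  Source B is only entered with i, j ≥ 0
-- under Pre_, so the indices are Nats here (the top-level .toNat is a totalisation
-- guard for n < 1, where the Python recursion does not return).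
def MDVmemo (mat : List (List Int)) : Nat → Nat → PySem.Dict (Int × Int) Int → Int × PySem.Dict (Int × Int) Int
  | i, j, memo =>
    match memo.get? ((i : Int), (j : Int)) with
    | some v => (v, memo)
    | none =>
      let p :=
        match i, j with
        | 0, 0 => ((0 : Int), memo)
        | 0, j + 1 => MDVmemo mat 0 j memo
        | i + 1, 0 => MDVmemo mat i 0 memo
        | i + 1, j + 1 =>
            let q := MDVmemo mat i (j + 1) memo
            let r := MDVmemo mat (i + 1) j q.2
            (max q.1 r.1, r.2)
      let v := if (mat.getD i []).getD j 0 = 1 then p.1 + 2 ^ (i + j) else p.1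
      (v, p.2.insert ((i : Int), (j : Int)) v)
  termination_by i j _ => i + j

def MaximumDecimalValue_alt (mat : List (List Int)) (n : Int) : Int :=
  (MDVmemo mat (n - 1).toNat (n - 1).toNat PySem.Dict.empty).1

-- ===== PRECONDITION & SPEC =====
-- Pre_ = exactly the inputs where Python A returns: n ≥ 1 and the first n rows exist
-- and each has at least n entries (otherwise A raises IndexError).
def Pre_MaximumDecimalValue (mat : List (List Int)) (n : Int) : Prop :=
  1 ≤ n ∧ n ≤ PySem.List.len mat ∧ ∀ row ∈ mat.take n.toNat, n ≤ PySem.List.len row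
instance (mat : List (List Int)) (n : Int) : Decidable (Pre_MaximumDecimalValue mat n) := by
  unfold Pre_MaximumDecimalValue; infer_instance

def pvWitness_MaximumDecimalValue : List (List Int) × Int := ([[1, 0], [1, 1]], 2)

def Spec_MaximumDecimalValue (mat : List (List Int)) (n : Int) (out : Int) : Prop := out = MaximumDecimalValue_alt mat n
instance (mat : List (List Int)) (n : Int) (out : Int) : Decidable (Spec_MaximumDecimalValue mat n out) := by unfold Spec_MaximumDecimalValue; infer_instance

-- ===== CLAIM (what is proved, stated in full; the proofs are below) =====
def Claim_equal_MaximumDecimalValue : Prop := ∀ (mat : List (List Int)) (n : Int), Dom_MaximumDecimalValue mat n → Pre_MaximumDecimalValue mat n → Spec_MaximumDecimalValue mat n (MaximumDecimalValue mat n)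

-- ===== LEMMAS AND PROOFS =====

def mAt (mat : List (List Int)) (i j : Nat) : Int := (mat.getD i []).getD j 0

def gv (mat : List (List Int)) : Nat → Nat → Int
  | 0, 0 => if mAt mat 0 0 = 1 then 1 else 0
  | 0, j + 1 => if mAt mat 0 (j + 1) = 1 then gv mat 0 j + 2 ^ (j + 1) else gv mat 0 j
  | i + 1, 0 => if mAt mat (i + 1) 0 = 1 then gv mat i 0 + 2 ^ (i + 1) else gv mat i 0
  | i + 1, j + 1 =>
      if mAt mat (i + 1) (j + 1) = 1 then
        max (gv mat (i + 1) j) (gv mat i (j + 1)) + 2 ^ (i + 1 + (j + 1))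
      else max (gv mat (i + 1) j) (gv mat i (j + 1))
  termination_by i j => (i, j)

def dpAt (dp : List (List Int)) (i j : Nat) : Int := (dp.getD i []).getD j 0

def Shape (N : Nat) (dp : List (List Int)) : Prop :=
  dp.length = N ∧ ∀ r < N, (dp.getD r []).length = N

theorem dpAt_set (dp : List (List Int)) (i j : Nat) (v : Int)
    (hi : i < dp.length) (hj : j < (dp.getD i []).length) (r c : Nat) :
    dpAt (dp.set i ((dp.getD i []).set j v)) r c = if r = i ∧ c = j then v else dpAt dp r c := by
  simp only [dpAt, List.getD]
  rcases eq_or_ne r i with hr | hr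
  · subst hr
    rw [List.getElem?_set_self (by omega)]
    simp only [Option.getD_some]
    rcases eq_or_ne c j with hc | hc
    · subst hc
      rw [List.getElem?_set_self (by simpa [List.getD] using hj)]
      simp
    · rw [List.getElem?_set_ne (Ne.symm hc)]
      simp [hc]
  · rw [List.getElem?_set_ne (Ne.symm hr)]
    simp [hr]

theorem shape_set (N : Nat) (dp : List (List Int)) (i j : Nat) (v : Int)
    (h : Shape N dp) (hi : i < N) :
    Shape N (dp.set i ((dp.getD i []).set j v)) := by
  obtain ⟨hl, hr⟩ := h
  refine ⟨by simp [hl], fun r hrN => ?_⟩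
  simp only [List.getD]
  rcases eq_or_ne r i with h1 | h1
  · subst h1
    rw [List.getElem?_set_self (by omega)]
    simpa [List.getD] using hr r hrN
  · rw [List.getElem?_set_ne (Ne.symm h1)]
    exact hr r hrN

theorem pyRange0 (n : Int) : PySem.List.pyRange 0 n 1 = (List.range n.toNat).map (fun k : Nat => (k : Int)) := by
  rw [PySem.List.pyRange_one]
  simp only [sub_zero]
  exact List.map_congr_left (fun k _ => zero_add _)

theorem pyRange1 (n : Int) : PySem.List.pyRange 1 n 1 = (List.range (n - 1).toNat).map (fun k : Nat => 1 + (k : Int)) :=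
  PySem.List.pyRange_one 1 n

theorem foldl_range_inv {α : Type} (M : Nat) (f : α → Nat → α) (P : Nat → α → Prop)
    (init : α) (h0 : P 0 init) (hs : ∀ k a, k < M → P k a → P (k + 1) (f a k)) :
    P M ((List.range M).foldl f init) := by
  induction M with
  | zero => simpa using h0
  | succ m ih =>
      rw [List.range_succ, List.foldl_append]
      exact hs m _ (Nat.lt_succ_self m) (ih (fun k a hk => hs k a (Nat.lt_succ_of_lt hk)))

theorem pySetD_zero' (xs : List (List Int)) (v : List Int) : PySem.List.pySetD xs 0 v = xs.set 0 v := by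
  have := PySem.List.pySetD_of_nonneg (xs := xs) (i := 0) (v := v) (by norm_num); simpa using this

theorem pySetD_zero'' (xs : List Int) (v : Int) : PySem.List.pySetD xs 0 v = xs.set 0 v := by
  have := PySem.List.pySetD_of_nonneg (xs := xs) (i := 0) (v := v) (by norm_num); simpa using this

def InvP (N : Nat) (f : Nat → Nat → Int) (dp : List (List Int)) : Prop :=
  Shape N dp ∧ ∀ r c, dpAt dp r c = f r c

def desc1 (mat : List (List Int)) (k r c : Nat) : Int :=
  if r = 0 ∧ c ≤ k then gv mat 0 c else 0

def desc2 (mat : List (List Int)) (N k r c : Nat) : Int :=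
  if r = 0 ∧ c < N then gv mat 0 c
  else if c = 0 ∧ r ≤ k then gv mat r 0 else 0

def desc3 (mat : List (List Int)) (N i jj r c : Nat) : Int :=
  if r < N ∧ c < N ∧ (r < i ∨ (r = i ∧ c ≤ jj)) then gv mat r c
  else if c = 0 ∧ r < N then gv mat r 0 else 0

theorem getD_map_const {α β : Type} (l : List α) (b d : β) (i : Nat) (h : i < l.length) :
    (l.map (fun _ => b)).getD i d = b := by
  simp only [List.getD, List.getElem?_map, List.getElem?_eq_getElem h, Option.map_some,
    Option.getD_some]

theorem len_pyRange0 (n : Int) : (PySem.List.pyRange 0 n 1).length = n.toNat := by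
  simp [pyRange0]

theorem init_zero (n : Int) :
    InvP n.toNat (fun _ _ => 0)
      ((PySem.List.pyRange 0 n 1).map (fun _ => (PySem.List.pyRange 0 n 1).map (fun _ => (0 : Int)))) := by
  have hz : ∀ c : Nat, ((PySem.List.pyRange 0 n 1).map (fun _ => (0 : Int))).getD c 0 = 0 := by
    intro c
    rcases lt_or_ge c (PySem.List.pyRange 0 n 1).length with hc | hc
    · exact getD_map_const _ _ _ _ hc
    · exact List.getD_eq_default _ _ (by rw [List.length_map]; exact hc)
  constructor
  · refine ⟨by rw [List.length_map, len_pyRange0], fun r hr => ?_⟩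
    rw [getD_map_const _ _ _ _ (by rw [len_pyRange0]; exact hr)]
    rw [List.length_map, len_pyRange0]
  · intro r c
    unfold dpAt
    rcases lt_or_ge r (PySem.List.pyRange 0 n 1).length with hr | hr
    · rw [getD_map_const _ _ _ _ hr]
      exact hz c
    · have h0 : ((PySem.List.pyRange 0 n 1).map
          (fun _ => (PySem.List.pyRange 0 n 1).map (fun _ => (0 : Int)))).getD r [] = [] :=
        List.getD_eq_default _ _ (by rw [List.length_map]; exact hr)
      rw [h0]
      exact List.getD_nil ..

theorem desc1_read (mat : List (List Int)) (k : Nat) (dp : List (List Int))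
    (h : ∀ r c, dpAt dp r c = desc1 mat k r c) (c : Nat) (hc : c ≤ k) :
    (dp.getD 0 []).getD c 0 = gv mat 0 c := by
  have := h 0 c
  unfold dpAt at this
  rw [this]
  unfold desc1
  simp [hc]

theorem stage0 (mat : List (List Int)) (n : Int) (h1 : 1 ≤ n) :
    InvP n.toNat (desc1 mat 0)
      (if PySem.List.pyGetD (PySem.List.pyGetD mat 0 []) 0 0 = 1 then
         PySem.List.pySetD
           ((PySem.List.pyRange 0 n 1).map (fun _ => (PySem.List.pyRange 0 n 1).map (fun _ => (0 : Int)))) 0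
           (PySem.List.pySetD
             (PySem.List.pyGetD
               ((PySem.List.pyRange 0 n 1).map (fun _ => (PySem.List.pyRange 0 n 1).map (fun _ => (0 : Int)))) 0 [])
             0 1)
       else (PySem.List.pyRange 0 n 1).map (fun _ => (PySem.List.pyRange 0 n 1).map (fun _ => (0 : Int)))) := by
  obtain ⟨hS, hz⟩ := init_zero n
  have hN : 1 ≤ n.toNat := by omega
  have hm : PySem.List.pyGetD (PySem.List.pyGetD mat 0 []) 0 0 = mAt mat 0 0 := by
    rw [PySem.List.pyGetD_zero, PySem.List.pyGetD_zero]; rfl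
  have hg0 : gv mat 0 0 = if mAt mat 0 0 = 1 then 1 else 0 := by rw [gv]
  rw [hm]
  split_ifs with h
  · rw [pySetD_zero', PySem.List.pyGetD_zero, pySetD_zero'']
    refine ⟨shape_set _ _ _ _ _ hS (by omega), fun r c => ?_⟩
    rw [dpAt_set _ _ _ _ (by rw [hS.1]; omega) (by rw [hS.2 0 (by omega)]; omega)]
    unfold desc1
    rcases Nat.eq_zero_or_pos r with hr | hr
    · rcases Nat.eq_zero_or_pos c with hc | hc
      · subst hr; subst hc; simp [hg0, h]
      · subst hr; rw [hz]; simp; omega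
    · rw [hz]; simp; omega
  · refine ⟨hS, fun r c => ?_⟩
    rw [hz]
    unfold desc1
    rcases Nat.eq_zero_or_pos r with hr | hr
    · rcases Nat.eq_zero_or_pos c with hc | hc
      · subst hr; subst hc; simp [hg0, h]
      · simp; omega
    · simp; omega

theorem stage1 (mat : List (List Int)) (n : Int) (h1 : 1 ≤ n) (dp : List (List Int))
    (h : InvP n.toNat (desc1 mat 0) dp) :
    InvP n.toNat (desc1 mat (n.toNat - 1))
      ((PySem.List.pyRange 1 n 1).foldl (fun dp i =>
        let v := if PySem.List.pyGetD (PySem.List.pyGetD mat 0 []) i 0 = 1 then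
            PySem.List.pyGetD (PySem.List.pyGetD dp 0 []) (i - 1) 0 + 2 ^ i.toNat
          else PySem.List.pyGetD (PySem.List.pyGetD dp 0 []) (i - 1) 0
        PySem.List.pySetD dp 0 (PySem.List.pySetD (PySem.List.pyGetD dp 0 []) i v)) dp) := by
  rw [pyRange1, List.foldl_map]
  have hM : (n - 1).toNat = n.toNat - 1 := by omega
  rw [← hM]
  refine foldl_range_inv ((n - 1).toNat) _ (fun k dp => InvP n.toNat (desc1 mat k) dp) dp h ?_
  intro k dp hk hdp
  dsimp only
  have e2 : (1 : Int) + (k : Nat) = ((k + 1 : Nat) : Int) := by omega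
  have e1 : (1 : Int) + (k : Nat) - 1 = ((k : Nat) : Int) := by omega
  rw [e1, e2]
  simp only [PySem.List.pyGetD_natCast, PySem.List.pyGetD_zero, PySem.List.pySetD_natCast,
    pySetD_zero', Int.toNat_natCast]
  have hkN : k + 1 < n.toNat := by omega
  have hread : (dp.getD 0 []).getD k 0 = gv mat 0 k := desc1_read mat k dp hdp.2 k (le_refl k)
  have hv : (if (mat.getD 0 []).getD (k + 1) 0 = 1 then
      (dp.getD 0 []).getD k 0 + 2 ^ (k + 1) else (dp.getD 0 []).getD k 0) = gv mat 0 (k + 1) := by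
    rw [hread, gv]; rfl
  rw [hv]
  refine ⟨shape_set _ _ _ _ _ hdp.1 (by omega), fun r c => ?_⟩
  rw [dpAt_set _ _ _ _ (by rw [hdp.1.1]; omega) (by rw [hdp.1.2 0 (by omega)]; omega)]
  by_cases hw : r = 0 ∧ c = k + 1
  · rw [if_pos hw]
    obtain ⟨h0, hc⟩ := hw; subst h0; subst hc
    unfold desc1; simp
  · rw [if_neg hw]
    rw [hdp.2 r c]
    unfold desc1
    split_ifs <;> first | rfl | omega | tauto

theorem conv12 (mat : List (List Int)) (N r c : Nat) (hN : 1 ≤ N) :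
    desc1 mat (N - 1) r c = desc2 mat N 0 r c := by
  rcases Nat.eq_zero_or_pos r with hr | hr
  · subst hr
    rcases Nat.eq_zero_or_pos c with hc | hc
    · subst hc; unfold desc1 desc2; split_ifs <;> first | rfl | omega | tauto
    · unfold desc1 desc2; split_ifs <;> first | rfl | omega | tauto
  · unfold desc1 desc2; split_ifs <;> first | rfl | omega | tauto

theorem conv23 (mat : List (List Int)) (N r c : Nat) (hN : 1 ≤ N) :
    desc2 mat N (N - 1) r c = desc3 mat N 1 0 r c := by
  rcases Nat.eq_zero_or_pos r with hr | hr
  · subst hr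
    rcases Nat.eq_zero_or_pos c with hc | hc
    · subst hc; unfold desc2 desc3; split_ifs <;> first | rfl | omega | tauto
    · unfold desc2 desc3; split_ifs <;> first | rfl | omega | tauto
  · rcases Nat.eq_zero_or_pos c with hc | hc
    · subst hc; unfold desc2 desc3; split_ifs <;> first | rfl | omega | tauto
    · unfold desc2 desc3; split_ifs <;> first | rfl | omega | tauto

theorem conv33 (mat : List (List Int)) (N k r c : Nat) (hN : 1 ≤ N) :
    desc3 mat N (k + 1) (N - 1) r c = desc3 mat N (k + 2) 0 r c := by
  rcases Nat.eq_zero_or_pos c with hc | hc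
  · subst hc; unfold desc3; split_ifs <;> first | rfl | omega | tauto
  · unfold desc3; split_ifs <;> first | rfl | omega | tauto

theorem stage2 (mat : List (List Int)) (n : Int) (h1 : 1 ≤ n) (dp : List (List Int))
    (h : InvP n.toNat (desc1 mat (n.toNat - 1)) dp) :
    InvP n.toNat (desc2 mat n.toNat (n.toNat - 1))
      ((PySem.List.pyRange 1 n 1).foldl (fun dp i =>
        let v := if PySem.List.pyGetD (PySem.List.pyGetD mat i []) 0 0 = 1 then
            PySem.List.pyGetD (PySem.List.pyGetD dp (i - 1) []) 0 0 + 2 ^ i.toNat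
          else PySem.List.pyGetD (PySem.List.pyGetD dp (i - 1) []) 0 0
        PySem.List.pySetD dp i (PySem.List.pySetD (PySem.List.pyGetD dp i []) 0 v)) dp) := by
  rw [pyRange1, List.foldl_map]
  have hM : (n - 1).toNat = n.toNat - 1 := by omega
  rw [← hM]
  refine foldl_range_inv ((n - 1).toNat) _ (fun k dp => InvP n.toNat (desc2 mat n.toNat k) dp) dp
    ⟨h.1, fun r c => by rw [h.2 r c]; exact conv12 mat n.toNat r c (by omega)⟩ ?_
  intro k dp hk hdp
  dsimp only
  have e2 : (1 : Int) + (k : Nat) = ((k + 1 : Nat) : Int) := by omega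
  have e1 : (1 : Int) + (k : Nat) - 1 = ((k : Nat) : Int) := by omega
  rw [e1, e2]
  simp only [PySem.List.pyGetD_natCast, PySem.List.pyGetD_zero, PySem.List.pySetD_natCast,
    pySetD_zero'', Int.toNat_natCast]
  have hkN : k + 1 < n.toNat := by omega
  have hread : (dp.getD k []).getD 0 0 = gv mat k 0 := by
    have := hdp.2 k 0
    unfold dpAt at this
    rw [this]
    unfold desc2
    rcases Nat.eq_zero_or_pos k with hk0 | hk0
    · subst hk0; simp
    · split_ifs <;> first | rfl | omega | tauto
  have hv : (if (mat.getD (k + 1) []).getD 0 0 = 1 then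
      (dp.getD k []).getD 0 0 + 2 ^ (k + 1) else (dp.getD k []).getD 0 0) = gv mat (k + 1) 0 := by
    rw [hread, gv]; rfl
  rw [hv]
  refine ⟨shape_set _ _ _ _ _ hdp.1 hkN, fun r c => ?_⟩
  rw [dpAt_set _ _ _ _ (by rw [hdp.1.1]; omega) (by rw [hdp.1.2 (k + 1) hkN]; omega)]
  by_cases hw : r = k + 1 ∧ c = 0
  · rw [if_pos hw]
    obtain ⟨h0, hc⟩ := hw; subst h0; subst hc
    unfold desc2; split_ifs <;> first | rfl | omega | tauto
  · rw [if_neg hw]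
    rw [hdp.2 r c]
    unfold desc2
    split_ifs <;> first | rfl | omega | tauto

theorem InvP_mono (N : Nat) (f g : Nat → Nat → Int) (dp : List (List Int))
    (h : ∀ r c, f r c = g r c) (hf : InvP N f dp) : InvP N g dp :=
  ⟨hf.1, fun r c => by rw [hf.2 r c, h r c]⟩

theorem stage3 (mat : List (List Int)) (n : Int) (h1 : 1 ≤ n) (dp : List (List Int))
    (h : InvP n.toNat (desc2 mat n.toNat (n.toNat - 1)) dp) :
    InvP n.toNat (desc3 mat n.toNat n.toNat 0)
      ((PySem.List.pyRange 1 n 1).foldl (fun dp i =>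
        (PySem.List.pyRange 1 n 1).foldl (fun dp j =>
          let v := if PySem.List.pyGetD (PySem.List.pyGetD mat i []) j 0 = 1 then
              max (PySem.List.pyGetD (PySem.List.pyGetD dp i []) (j - 1) 0)
                  (PySem.List.pyGetD (PySem.List.pyGetD dp (i - 1) []) j 0) + 2 ^ (i + j).toNat
            else
              max (PySem.List.pyGetD (PySem.List.pyGetD dp i []) (j - 1) 0)
                  (PySem.List.pyGetD (PySem.List.pyGetD dp (i - 1) []) j 0)
          PySem.List.pySetD dp i (PySem.List.pySetD (PySem.List.pyGetD dp i []) j v)) dp) dp) := by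
  have hstart : InvP n.toNat (desc3 mat n.toNat 1 0) dp :=
    ⟨h.1, fun r c => by rw [h.2 r c]; exact conv23 mat n.toNat r c (by omega)⟩
  have hM : (n - 1).toNat = n.toNat - 1 := by omega
  rw [pyRange1]
  simp only [List.foldl_map]
  refine InvP_mono _ _ _ _ (fun r c => by rw [show (n - 1).toNat + 1 = n.toNat from by omega])
    (foldl_range_inv ((n - 1).toNat) _
      (fun k dp => InvP n.toNat (desc3 mat n.toNat (k + 1) 0) dp) dp hstart ?_)
  intro k dp hk hdp
  dsimp only
  have hkN : k + 1 < n.toNat := by omega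
  refine InvP_mono _ _ _ _
    (fun r c => by rw [hM, show k + 1 + 1 = k + 2 from rfl]; exact conv33 mat n.toNat k r c (by omega))
    (foldl_range_inv ((n - 1).toNat) _
      (fun jj dp => InvP n.toNat (desc3 mat n.toNat (k + 1) jj) dp) dp hdp ?_)
  intro jj dp hjj hq
  dsimp only
  have e1 : (1 : Int) + (k : Nat) - 1 = ((k : Nat) : Int) := by omega
  have f1 : (1 : Int) + (jj : Nat) - 1 = ((jj : Nat) : Int) := by omega
  simp only [e1, f1]
  have e2 : (1 : Int) + (k : Nat) = ((k + 1 : Nat) : Int) := by omega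
  have f2 : (1 : Int) + (jj : Nat) = ((jj + 1 : Nat) : Int) := by omega
  simp only [e2, f2]
  have f4 : ((k + 1 : Nat) : Int) + ((jj + 1 : Nat) : Int) = ((k + 1 + (jj + 1) : Nat) : Int) := by
    push_cast; ring
  rw [f4]
  simp only [PySem.List.pyGetD_natCast, PySem.List.pySetD_natCast, Int.toNat_natCast]
  have hjN : jj + 1 < n.toNat := by omega
  have hr1 : (dp.getD (k + 1) []).getD jj 0 = gv mat (k + 1) jj := by
    have := hq.2 (k + 1) jj
    unfold dpAt at this
    rw [this]
    unfold desc3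
    split_ifs <;> first | rfl | omega | tauto
  have hr2 : (dp.getD k []).getD (jj + 1) 0 = gv mat k (jj + 1) := by
    have := hq.2 k (jj + 1)
    unfold dpAt at this
    rw [this]
    unfold desc3
    split_ifs <;> first | rfl | omega | tauto
  have hv : (if (mat.getD (k + 1) []).getD (jj + 1) 0 = 1 then
      max ((dp.getD (k + 1) []).getD jj 0) ((dp.getD k []).getD (jj + 1) 0) + 2 ^ (k + 1 + (jj + 1))
    else max ((dp.getD (k + 1) []).getD jj 0) ((dp.getD k []).getD (jj + 1) 0)) = gv mat (k + 1) (jj + 1) := by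
    rw [hr1, hr2, gv]; rfl
  rw [hv]
  refine ⟨shape_set _ _ _ _ _ hq.1 hkN, fun r c => ?_⟩
  rw [dpAt_set _ _ _ _ (by rw [hq.1.1]; omega) (by rw [hq.1.2 (k + 1) hkN]; omega)]
  by_cases hw : r = k + 1 ∧ c = jj + 1
  · rw [if_pos hw]
    obtain ⟨h0, hc⟩ := hw; subst h0; subst hc
    unfold desc3
    split_ifs <;> first | rfl | omega | tauto
  · rw [if_neg hw]
    rw [hq.2 r c]
    unfold desc3
    split_ifs <;> first | rfl | omega | tauto

theorem stage4 (mat : List (List Int)) (n : Int) (h1 : 1 ≤ n) (dp : List (List Int))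
    (h : InvP n.toNat (desc3 mat n.toNat n.toNat 0) dp) :
    PySem.List.pyGetD (PySem.List.pyGetD dp (n - 1) []) (n - 1) 0 = gv mat (n.toNat - 1) (n.toNat - 1) := by
  have e : (n - 1) = ((n.toNat - 1 : Nat) : Int) := by omega
  rw [e]
  simp only [PySem.List.pyGetD_natCast]
  have hv := h.2 (n.toNat - 1) (n.toNat - 1)
  unfold dpAt at hv
  rw [hv]
  unfold desc3
  split_ifs <;> first | rfl | omega | tauto

theorem A_eq_gv (mat : List (List Int)) (n : Int) (h1 : 1 ≤ n) :
    MaximumDecimalValue mat n = gv mat (n.toNat - 1) (n.toNat - 1) := by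
  unfold MaximumDecimalValue
  exact stage4 mat n h1 _ (stage3 mat n h1 _ (stage2 mat n h1 _ (stage1 mat n h1 _ (stage0 mat n h1))))

-- ----- B side: the memoised recursion computes gv -----

def ValidMemo (mat : List (List Int)) (memo : PySem.Dict (Int × Int) Int) : Prop :=
  ∀ (i j : Nat) (v : Int), memo.get? ((i : Int), (j : Int)) = some v → v = gv mat i j

theorem validMemo_empty (mat : List (List Int)) : ValidMemo mat PySem.Dict.empty := by
  intro i j v h
  rw [PySem.Dict.get?_empty] at h
  exact absurd h (by simp)

theorem validMemo_insert (mat : List (List Int)) (memo : PySem.Dict (Int × Int) Int)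
    (h : ValidMemo mat memo) (i j : Nat) (v : Int) (hv : v = gv mat i j) :
    ValidMemo mat (memo.insert ((i : Int), (j : Int)) v) := by
  intro i' j' w hw
  rw [PySem.Dict.get?_insert] at hw
  split_ifs at hw with he
  · obtain ⟨hi, hj⟩ := Prod.mk.injEq .. ▸ he
    have hi' : i' = i := by exact_mod_cast hi
    have hj' : j' = j := by exact_mod_cast hj
    subst hi'; subst hj'
    cases hw; exact hv
  · exact h i' j' w hw

theorem MDVmemo_correct (mat : List (List Int)) :
    ∀ (m i j : Nat), i + j = m → ∀ memo, ValidMemo mat memo →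
      (MDVmemo mat i j memo).1 = gv mat i j ∧ ValidMemo mat (MDVmemo mat i j memo).2 := by
  intro m
  induction m using Nat.strong_induction_on with
  | _ m ih =>
    intro i j hm memo hval
    rw [MDVmemo.eq_def]
    dsimp only
    cases hg : memo.get? ((i : Int), (j : Int)) with
    | some v =>
        exact ⟨hval i j v hg, hval⟩
    | none =>
        rcases i with _ | r <;> [skip; skip] <;> dsimp only
        · rcases j with _ | s
          · constructor
            · show (if (mat.getD 0 []).getD 0 0 = 1 then (0 : Int) + 2 ^ (0 + 0) else 0) = gv mat 0 0
              rw [gv]; unfold mAt; norm_num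
            · refine validMemo_insert mat memo hval 0 0 _ ?_
              show (if (mat.getD 0 []).getD 0 0 = 1 then (0 : Int) + 2 ^ (0 + 0) else 0) = gv mat 0 0
              rw [gv]; unfold mAt; norm_num
          · have hrec := ih s (by omega) 0 s (by omega) memo hval
            have hv : (if (mat.getD 0 []).getD (s + 1) 0 = 1 then
                (MDVmemo mat 0 s memo).1 + 2 ^ (0 + (s + 1)) else (MDVmemo mat 0 s memo).1)
                = gv mat 0 (s + 1) := by
              rw [hrec.1, gv]; unfold mAt
              simp only [Nat.zero_add]
            constructor
            · exact hv
            · exact validMemo_insert mat _ hrec.2 0 (s + 1) _ hv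
        · rcases j with _ | s
          · have hrec := ih r (by omega) r 0 (by omega) memo hval
            have hv : (if (mat.getD (r + 1) []).getD 0 0 = 1 then
                (MDVmemo mat r 0 memo).1 + 2 ^ (r + 1 + 0) else (MDVmemo mat r 0 memo).1)
                = gv mat (r + 1) 0 := by
              rw [hrec.1, gv]; unfold mAt
              simp only [Nat.add_zero]
            constructor
            · exact hv
            · exact validMemo_insert mat _ hrec.2 (r + 1) 0 _ hv
          · have hq := ih (r + (s + 1)) (by omega) r (s + 1) (by omega) memo hval
            have hr := ih (r + 1 + s) (by omega) (r + 1) s (by omega) _ hq.2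
            have hmax : max (MDVmemo mat r (s + 1) memo).1
                (MDVmemo mat (r + 1) s (MDVmemo mat r (s + 1) memo).2).1
                = max (gv mat (r + 1) s) (gv mat r (s + 1)) := by
              rw [hq.1, hr.1, max_comm]
            have hv : (if (mat.getD (r + 1) []).getD (s + 1) 0 = 1 then
                max (MDVmemo mat r (s + 1) memo).1
                  (MDVmemo mat (r + 1) s (MDVmemo mat r (s + 1) memo).2).1 + 2 ^ (r + 1 + (s + 1))
                else max (MDVmemo mat r (s + 1) memo).1
                  (MDVmemo mat (r + 1) s (MDVmemo mat r (s + 1) memo).2).1)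
                = gv mat (r + 1) (s + 1) := by
              rw [hmax, gv]; unfold mAt
              rfl
            constructor
            · exact hv
            · exact validMemo_insert mat _ hr.2 (r + 1) (s + 1) _ hv

theorem B_eq_gv (mat : List (List Int)) (n : Int) (h1 : 1 ≤ n) :
    MaximumDecimalValue_alt mat n = gv mat (n.toNat - 1) (n.toNat - 1) := by
  unfold MaximumDecimalValue_alt
  have e : (n - 1).toNat = n.toNat - 1 := by omega
  rw [e]
  exact (MDVmemo_correct mat ((n.toNat - 1) + (n.toNat - 1)) _ _ rfl PySem.Dict.empty
    (validMemo_empty mat)).1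

-- ===== VERDICT (by name: the statement is the Claim_ definition above) =====
theorem MaximumDecimalValue_spec : Claim_equal_MaximumDecimalValue := by
  intro mat n hdom hpre
  unfold Spec_MaximumDecimalValue
  rw [A_eq_gv mat n hpre.1, B_eq_gv mat n hpre.1]
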